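-- pv_equiv track=rewrite | github.com/tdviet/fedcloudclient | fedcloudclient/select.py | filter_network
-- ===== SOURCE A (Python) =====
-- def compare_network(network_item):
--     """
--     Helper function for sorting network
--     Sorting order: public, private shared, private
--
--     :param network_item:
--
--     :return:
--     """
--     return (
--         1 if network_item.get("Router Type") else 0,
--         1 if network_item.get("Shared") else 0,
--     )
--
-- def filter_network(networks, network_specs, project_id):
--     """
--     Filter network according to network specifications
--
--     :param networks: List of all networks
--     :param network_specs: Network specifications
--     :param project_id: Project ID for assessment of access
--
--     :return: List of matched network
--     """
--     match_networks = []
--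
--     for network_item in networks:
--         if network_item.get("Shared") or network_item.get("Project") == project_id:
--             if network_specs == "private":
--                 if not network_item.get("Router Type"):
--                     match_networks.append(network_item)
--             elif network_specs == "public":
--                 if network_item.get("Router Type"):
--                     match_networks.append(network_item)
--             else:
--                 match_networks.append(network_item)
--
--     return sorted(match_networks, key=compare_network, reverse=True)
-- ===== SOURCE B (Python) =====
-- def filter_network(networks, network_specs, project_id):
--     # One pass into four buckets keyed by (router, shared); concatenating the
--     # buckets in descending key order replaces the final comparison sort.
--     buckets = {(True, True): [], (True, False): [], (False, True): [], (False, False): []}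
--     for item in networks:
--         shared = bool(item.get("Shared"))
--         if not (shared or item.get("Project") == project_id):
--             continue
--         router = bool(item.get("Router Type"))
--         if (network_specs == "private" and router) or (network_specs == "public" and not router):
--             continue
--         buckets[(router, shared)].append(item)
--     return (buckets[(True, True)] + buckets[(True, False)]
--             + buckets[(False, True)] + buckets[(False, False)])
-- ===== Notes on version B (the rewrite author's own statement) =====
-- stated objective: alternative
-- what changed: B replaces A's filter-then-stable-sort (sorted with a tuple key, reverse=True) by a single pass that drops each kept network into one of four buckets keyed by (router, shared) and returns the buckets concatenated in descending key order, eliminating the comparison sort.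
import Mathlib
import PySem

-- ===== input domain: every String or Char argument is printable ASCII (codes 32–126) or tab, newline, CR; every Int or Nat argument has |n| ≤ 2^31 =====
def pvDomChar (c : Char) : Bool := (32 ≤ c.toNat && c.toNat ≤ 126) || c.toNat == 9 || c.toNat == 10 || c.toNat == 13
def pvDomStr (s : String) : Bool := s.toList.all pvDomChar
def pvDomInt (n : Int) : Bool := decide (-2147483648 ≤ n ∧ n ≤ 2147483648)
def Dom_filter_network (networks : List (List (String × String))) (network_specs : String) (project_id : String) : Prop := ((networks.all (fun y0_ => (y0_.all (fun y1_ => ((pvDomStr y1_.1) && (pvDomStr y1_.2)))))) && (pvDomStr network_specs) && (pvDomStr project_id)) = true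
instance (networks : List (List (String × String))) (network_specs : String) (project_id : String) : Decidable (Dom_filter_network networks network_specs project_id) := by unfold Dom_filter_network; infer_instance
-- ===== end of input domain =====

-- B replaces A's final comparison sort by a single pass into four buckets keyed by
-- (router, shared), concatenated in descending key order (objective: alternative).

-- Python truthiness of `network_item.get(k)`: None and "" are falsy (shared semantic helper).
def pvTruthy (o : Option String) : Bool :=
  match o with
  | none => false
  | some s => !s.toList.isEmpty

-- ===== PORT A =====
def compare_network (network_item : List (String × String)) : Int × Int :=
  ((if pvTruthy (PySem.Dict.get? ⟨network_item⟩ "Router Type") then 1 else 0),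
   (if pvTruthy (PySem.Dict.get? ⟨network_item⟩ "Shared") then 1 else 0))

def filter_network (networks : List (List (String × String))) (network_specs : String) (project_id : String) : List (List (String × String)) :=
  let match_networks := networks.foldl (fun acc network_item =>
    if pvTruthy (PySem.Dict.get? ⟨network_item⟩ "Shared")
        || (PySem.Dict.get? ⟨network_item⟩ "Project" == some project_id) then
      if network_specs == "private" then
        if !pvTruthy (PySem.Dict.get? ⟨network_item⟩ "Router Type") then acc ++ [network_item] else acc
      else if network_specs == "public" then
        if pvTruthy (PySem.Dict.get? ⟨network_item⟩ "Router Type") then acc ++ [network_item] else acc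
      else acc ++ [network_item]
    else acc) []
  PySem.List.sorted2 match_networks
    (fun i => (compare_network i).1) (fun i => (compare_network i).2) true

-- ===== PORT B =====
def filter_network_alt (networks : List (List (String × String))) (network_specs : String) (project_id : String) : List (List (String × String)) :=
  let buckets := networks.foldl
    (fun (bs : List (List (String × String)) × List (List (String × String)) × List (List (String × String)) × List (List (String × String))) item =>
      let shared := pvTruthy (PySem.Dict.get? ⟨item⟩ "Shared")
      if !(shared || (PySem.Dict.get? ⟨item⟩ "Project" == some project_id)) then bs
      else
        let router := pvTruthy (PySem.Dict.get? ⟨item⟩ "Router Type")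
        if (network_specs == "private" && router) || (network_specs == "public" && !router) then bs
        else
          match router, shared with
          | true,  true  => (bs.1 ++ [item], bs.2.1, bs.2.2.1, bs.2.2.2)
          | true,  false => (bs.1, bs.2.1 ++ [item], bs.2.2.1, bs.2.2.2)
          | false, true  => (bs.1, bs.2.1, bs.2.2.1 ++ [item], bs.2.2.2)
          | false, false => (bs.1, bs.2.1, bs.2.2.1, bs.2.2.2 ++ [item]))
    ([], [], [], [])
  buckets.1 ++ buckets.2.1 ++ buckets.2.2.1 ++ buckets.2.2.2

-- ===== PRECONDITION & SPEC =====
def Spec_filter_network (networks : List (List (String × String))) (network_specs : String) (project_id : String) (out : List (List (String × String))) : Prop := out = filter_network_alt networks network_specs project_id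
instance (networks : List (List (String × String))) (network_specs : String) (project_id : String) (out : List (List (String × String))) : Decidable (Spec_filter_network networks network_specs project_id out) := by unfold Spec_filter_network; infer_instance

-- ===== CLAIM (what is proved, stated in full; the proofs are below) =====
def Claim_equal_filter_network : Prop := ∀ (networks : List (List (String × String))) (network_specs : String) (project_id : String), Dom_filter_network networks network_specs project_id → Spec_filter_network networks network_specs project_id (filter_network networks network_specs project_id)

-- ===== LEMMAS AND PROOFS =====

def pvRouter (i : List (String × String)) : Bool := pvTruthy (PySem.Dict.get? ⟨i⟩ "Router Type")
def pvShared (i : List (String × String)) : Bool := pvTruthy (PySem.Dict.get? ⟨i⟩ "Shared")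
def pvGuard (project_id : String) (i : List (String × String)) : Bool :=
  pvShared i || (PySem.Dict.get? ⟨i⟩ "Project" == some project_id)
def pvKeep (network_specs project_id : String) (i : List (String × String)) : Bool :=
  pvGuard project_id i &&
    (if network_specs == "private" then !pvRouter i
     else if network_specs == "public" then pvRouter i
     else true)
def pvBkt (r s : Bool) (i : List (String × String)) : Bool :=
  pvRouter i == r && pvShared i == s

def pvBefore (a b : List (String × String)) : Bool :=
  decide ((compare_network b).1 < (compare_network a).1) ||
    (!decide ((compare_network a).1 < (compare_network b).1) &&
      decide ((compare_network b).2 < (compare_network a).2))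

lemma pvBefore_eq (a b : List (String × String)) :
    pvBefore a b = ((!pvRouter b && pvRouter a) ||
      ((pvRouter b == pvRouter a) && (!pvShared b && pvShared a))) := by
  simp only [pvBefore, compare_network, pvRouter, pvShared]
  rcases Bool.eq_false_or_eq_true (pvTruthy (PySem.Dict.get? ⟨a⟩ "Router Type")) with h1 | h1 <;>
    rcases Bool.eq_false_or_eq_true (pvTruthy (PySem.Dict.get? ⟨b⟩ "Router Type")) with h2 | h2 <;>
    rcases Bool.eq_false_or_eq_true (pvTruthy (PySem.Dict.get? ⟨a⟩ "Shared")) with h3 | h3 <;>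
    rcases Bool.eq_false_or_eq_true (pvTruthy (PySem.Dict.get? ⟨b⟩ "Shared")) with h4 | h4 <;>
    simp [h1, h2, h3, h4]

lemma insert_mid {α : Type} (before : α → α → Bool) (x : α) (ys zs : List α)
    (h1 : ∀ y ∈ ys, before x y = false) (h2 : ∀ z ∈ zs, before x z = true) :
    PySem.List.insertBy before x (ys ++ zs) = ys ++ x :: zs := by
  induction ys with
  | nil =>
    cases zs with
    | nil => rfl
    | cons z zs' => simp [PySem.List.insertBy, h2 z (by simp)]
  | cons y ys' ih =>
    simp only [List.cons_append, PySem.List.insertBy, h1 y (by simp)]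
    simp only [Bool.false_eq_true, if_false]
    exact congrArg (y :: ·) (ih (fun y' hy' => h1 y' (by simp [hy'])))

lemma keep_iff (network_specs project_id : String) (i : List (String × String)) :
    pvKeep network_specs project_id i
    = (pvGuard project_id i &&
        !((network_specs == "private" && pvRouter i)
          || (network_specs == "public" && !pvRouter i))) := by
  by_cases hp : (network_specs == "private") = true
  · have hq : (network_specs == "public") = false := by
      have := eq_of_beq hp; subst this; rfl
    simp [pvKeep, hp, hq]
  · have hp' : (network_specs == "private") = false := by simpa using hp
    by_cases hq : (network_specs == "public") = true
    · simp [pvKeep, hp', hq]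
    · have hq' : (network_specs == "public") = false := by simpa using hq
      simp [pvKeep, hp', hq']

lemma a_loop (network_specs project_id : String) (nets : List (List (String × String)))
    (acc : List (List (String × String))) :
    nets.foldl (fun acc network_item =>
      if pvTruthy (PySem.Dict.get? ⟨network_item⟩ "Shared")
          || (PySem.Dict.get? ⟨network_item⟩ "Project" == some project_id) then
        if network_specs == "private" then
          if !pvTruthy (PySem.Dict.get? ⟨network_item⟩ "Router Type") then acc ++ [network_item] else acc
        else if network_specs == "public" then
          if pvTruthy (PySem.Dict.get? ⟨network_item⟩ "Router Type") then acc ++ [network_item] else acc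
        else acc ++ [network_item]
      else acc) acc
    = acc ++ nets.filter (pvKeep network_specs project_id) := by
  induction nets generalizing acc with
  | nil => simp
  | cons i rest ih =>
    rw [List.foldl_cons, List.filter_cons, ih]
    by_cases hp : (network_specs == "private") = true
    · have hq : (network_specs == "public") = false := by
        have := eq_of_beq hp; subst this; rfl
      rcases Bool.eq_false_or_eq_true (pvTruthy (PySem.Dict.get? ⟨i⟩ "Shared")) with hs | hs <;>
        rcases Bool.eq_false_or_eq_true (PySem.Dict.get? ⟨i⟩ "Project" == some project_id) with hpj | hpj <;>
        rcases Bool.eq_false_or_eq_true (pvTruthy (PySem.Dict.get? ⟨i⟩ "Router Type")) with hr | hr <;>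
        simp [keep_iff, hp, hq, hs, hpj, hr, pvBkt, pvGuard, pvRouter, pvShared,
          List.filter_cons, List.append_assoc]
    · have hp' : (network_specs == "private") = false := by simpa using hp
      by_cases hq : (network_specs == "public") = true
      · rcases Bool.eq_false_or_eq_true (pvTruthy (PySem.Dict.get? ⟨i⟩ "Shared")) with hs | hs <;>
          rcases Bool.eq_false_or_eq_true (PySem.Dict.get? ⟨i⟩ "Project" == some project_id) with hpj | hpj <;>
          rcases Bool.eq_false_or_eq_true (pvTruthy (PySem.Dict.get? ⟨i⟩ "Router Type")) with hr | hr <;>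
          simp [keep_iff, hp', hq, hs, hpj, hr, pvBkt, pvGuard, pvRouter, pvShared,
            List.filter_cons, List.append_assoc]
      · have hq' : (network_specs == "public") = false := by simpa using hq
        rcases Bool.eq_false_or_eq_true (pvTruthy (PySem.Dict.get? ⟨i⟩ "Shared")) with hs | hs <;>
          rcases Bool.eq_false_or_eq_true (PySem.Dict.get? ⟨i⟩ "Project" == some project_id) with hpj | hpj <;>
          rcases Bool.eq_false_or_eq_true (pvTruthy (PySem.Dict.get? ⟨i⟩ "Router Type")) with hr | hr <;>
          simp [keep_iff, hp', hq', hs, hpj, hr, pvBkt, pvGuard, pvRouter, pvShared,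
            List.filter_cons, List.append_assoc]

lemma b_loop (network_specs project_id : String) (nets : List (List (String × String)))
    (bs : List (List (String × String)) × List (List (String × String)) × List (List (String × String)) × List (List (String × String))) :
    nets.foldl
      (fun bs item =>
        let shared := pvTruthy (PySem.Dict.get? ⟨item⟩ "Shared")
        if !(shared || (PySem.Dict.get? ⟨item⟩ "Project" == some project_id)) then bs
        else
          let router := pvTruthy (PySem.Dict.get? ⟨item⟩ "Router Type")
          if (network_specs == "private" && router) || (network_specs == "public" && !router) then bs
          else
            match router, shared with
            | true,  true  => (bs.1 ++ [item], bs.2.1, bs.2.2.1, bs.2.2.2)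
            | true,  false => (bs.1, bs.2.1 ++ [item], bs.2.2.1, bs.2.2.2)
            | false, true  => (bs.1, bs.2.1, bs.2.2.1 ++ [item], bs.2.2.2)
            | false, false => (bs.1, bs.2.1, bs.2.2.1, bs.2.2.2 ++ [item])) bs
    = (bs.1 ++ (nets.filter (pvKeep network_specs project_id)).filter (pvBkt true true),
       bs.2.1 ++ (nets.filter (pvKeep network_specs project_id)).filter (pvBkt true false),
       bs.2.2.1 ++ (nets.filter (pvKeep network_specs project_id)).filter (pvBkt false true),
       bs.2.2.2 ++ (nets.filter (pvKeep network_specs project_id)).filter (pvBkt false false)) := by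
  induction nets generalizing bs with
  | nil => simp
  | cons i rest ih =>
    rw [List.foldl_cons, ih]
    by_cases hp : (network_specs == "private") = true
    · have hq : (network_specs == "public") = false := by
        have := eq_of_beq hp; subst this; rfl
      rcases Bool.eq_false_or_eq_true (pvTruthy (PySem.Dict.get? ⟨i⟩ "Shared")) with hs | hs <;>
        rcases Bool.eq_false_or_eq_true (PySem.Dict.get? ⟨i⟩ "Project" == some project_id) with hpj | hpj <;>
        rcases Bool.eq_false_or_eq_true (pvTruthy (PySem.Dict.get? ⟨i⟩ "Router Type")) with hr | hr <;>
        simp [keep_iff, hp, hq, hs, hpj, hr, pvBkt, pvGuard, pvRouter, pvShared,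
          List.filter_cons, List.append_assoc]
    · have hp' : (network_specs == "private") = false := by simpa using hp
      by_cases hq : (network_specs == "public") = true
      · rcases Bool.eq_false_or_eq_true (pvTruthy (PySem.Dict.get? ⟨i⟩ "Shared")) with hs | hs <;>
          rcases Bool.eq_false_or_eq_true (PySem.Dict.get? ⟨i⟩ "Project" == some project_id) with hpj | hpj <;>
          rcases Bool.eq_false_or_eq_true (pvTruthy (PySem.Dict.get? ⟨i⟩ "Router Type")) with hr | hr <;>
          simp [keep_iff, hp', hq, hs, hpj, hr, pvBkt, pvGuard, pvRouter, pvShared,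
            List.filter_cons, List.append_assoc]
      · have hq' : (network_specs == "public") = false := by simpa using hq
        rcases Bool.eq_false_or_eq_true (pvTruthy (PySem.Dict.get? ⟨i⟩ "Shared")) with hs | hs <;>
          rcases Bool.eq_false_or_eq_true (PySem.Dict.get? ⟨i⟩ "Project" == some project_id) with hpj | hpj <;>
          rcases Bool.eq_false_or_eq_true (pvTruthy (PySem.Dict.get? ⟨i⟩ "Router Type")) with hr | hr <;>
          simp [keep_iff, hp', hq', hs, hpj, hr, pvBkt, pvGuard, pvRouter, pvShared,
            List.filter_cons, List.append_assoc]

lemma sort_buckets (m : List (List (String × String))) :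
    m.foldl (fun acc x => PySem.List.insertBy pvBefore x acc) []
    = m.filter (pvBkt true true) ++ m.filter (pvBkt true false)
      ++ m.filter (pvBkt false true) ++ m.filter (pvBkt false false) := by
  induction m using List.reverseRecOn with
  | nil => simp
  | append_singleton m x ih =>
    rw [List.foldl_append, List.foldl_cons, List.foldl_nil, ih]
    have hbef : ∀ y : List (String × String), pvBefore x y =
        ((!pvRouter y && pvRouter x) ||
          ((pvRouter y == pvRouter x) && (!pvShared y && pvShared x))) := fun y => pvBefore_eq x y
    have hmem : ∀ (r s : Bool) (y : List (String × String)),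
        y ∈ m.filter (pvBkt r s) → pvRouter y = r ∧ pvShared y = s := by
      intro r s y hy
      have := List.of_mem_filter hy
      simp [pvBkt] at this; exact this
    simp only [List.filter_append]
    cases hr : pvRouter x <;> cases hs : pvShared x
    · -- key (0,0): goes after everything
      have := insert_mid pvBefore x
        (m.filter (pvBkt true true) ++ m.filter (pvBkt true false)
          ++ m.filter (pvBkt false true) ++ m.filter (pvBkt false false)) []
        (by intro y hy
            simp only [List.append_assoc, List.mem_append] at hy
            rcases hy with hy | hy | hy | hy <;>
              [skip; skip; skip; skip] <;>
              · obtain ⟨h1, h2⟩ := hmem _ _ y hy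
                rw [hbef, h1, h2, hr, hs]; rfl)
        (by intro z hz; simp at hz)
      simp only [List.append_assoc, List.append_nil] at this ⊢
      rw [this]
      simp [pvBkt, hr, hs, List.filter_cons]
    · -- key (0,1)
      have := insert_mid pvBefore x
        (m.filter (pvBkt true true) ++ m.filter (pvBkt true false) ++ m.filter (pvBkt false true))
        (m.filter (pvBkt false false))
        (by intro y hy
            simp only [List.append_assoc, List.mem_append] at hy
            rcases hy with hy | hy | hy <;>
              · obtain ⟨h1, h2⟩ := hmem _ _ y hy
                rw [hbef, h1, h2, hr, hs]; rfl)
        (by intro z hz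
            obtain ⟨h1, h2⟩ := hmem _ _ z hz
            rw [hbef, h1, h2, hr, hs]; rfl)
      simp only [List.append_assoc] at this ⊢
      rw [this]
      simp [pvBkt, hr, hs, List.filter_cons]
    · -- key (1,0)
      have := insert_mid pvBefore x
        (m.filter (pvBkt true true) ++ m.filter (pvBkt true false))
        (m.filter (pvBkt false true) ++ m.filter (pvBkt false false))
        (by intro y hy
            simp only [List.mem_append] at hy
            rcases hy with hy | hy <;>
              · obtain ⟨h1, h2⟩ := hmem _ _ y hy
                rw [hbef, h1, h2, hr, hs]; rfl)
        (by intro z hz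
            simp only [List.mem_append] at hz
            rcases hz with hz | hz <;>
              · obtain ⟨h1, h2⟩ := hmem _ _ z hz
                rw [hbef, h1, h2, hr, hs]; rfl)
      simp only [List.append_assoc] at this ⊢
      rw [this]
      simp [pvBkt, hr, hs, List.filter_cons]
    · -- key (1,1): goes at the end of the first bucket
      have := insert_mid pvBefore x
        (m.filter (pvBkt true true))
        (m.filter (pvBkt true false) ++ m.filter (pvBkt false true) ++ m.filter (pvBkt false false))
        (by intro y hy
            obtain ⟨h1, h2⟩ := hmem _ _ y hy
            rw [hbef, h1, h2, hr, hs]; rfl)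
        (by intro z hz
            simp only [List.mem_append] at hz
            rcases hz with (hz | hz) | hz <;>
              · obtain ⟨h1, h2⟩ := hmem _ _ z hz
                rw [hbef, h1, h2, hr, hs]; rfl)
      simp only [List.append_assoc] at this ⊢
      rw [this]
      simp [pvBkt, hr, hs, List.filter_cons]

lemma sorted2_unfold (m : List (List (String × String))) :
    PySem.List.sorted2 m (fun i => (compare_network i).1) (fun i => (compare_network i).2) true
    = m.foldl (fun acc x => PySem.List.insertBy pvBefore x acc) [] := rfl

-- ===== VERDICT (by name: the statement is the Claim_ definition above) =====
theorem filter_network_spec : Claim_equal_filter_network := by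
  intro networks network_specs project_id _
  show filter_network networks network_specs project_id
      = filter_network_alt networks network_specs project_id
  unfold filter_network filter_network_alt
  rw [a_loop, b_loop]
  simp only [List.nil_append, List.append_nil]
  rw [sorted2_unfold, sort_buckets]
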